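-- pv_equiv track=rewrite | github.com/RuanVitorr/atividades-de-Computabilidade-e-Complexidade-de-Algortimos | att01.py | valida_string
-- ===== SOURCE A (Python) =====
-- def valida_string(palavra):
--     estado = 'q0'
--
--     for char in palavra:
--         if estado == 'q0':
--             if char=='0':
--                 estado ='q0'
--             elif char == '1':
--                 estado = 'q1'
--             else:
--                 estado = 'rejeita'
--                 break
--         elif estado =='q1':
--             if char =='0':
--                 estado ='q0'
--             elif char =='1':
--                 estado ='q1'
--             else:
--                 estado = 'rejeita'
--                 break
--
--     if estado=='q1':
--         return "palavra valida(termina com 1)"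
--     else:
--         return'palavra invalida(termina com 0)'
-- ===== SOURCE B (Python) =====
-- def valida_string(palavra):
--     if palavra and palavra[-1] == '1' and all(c in '01' for c in palavra):
--         return "palavra valida(termina com 1)"
--     else:
--         return'palavra invalida(termina com 0)'
-- ===== Notes on version B (the rewrite author's own statement) =====
-- stated objective: simpler
-- what changed: Replaced the q0/q1/rejeita state-machine loop with a flat predicate: non-empty, last character is '1', and all characters are in {'0','1'}.
import Mathlib
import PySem

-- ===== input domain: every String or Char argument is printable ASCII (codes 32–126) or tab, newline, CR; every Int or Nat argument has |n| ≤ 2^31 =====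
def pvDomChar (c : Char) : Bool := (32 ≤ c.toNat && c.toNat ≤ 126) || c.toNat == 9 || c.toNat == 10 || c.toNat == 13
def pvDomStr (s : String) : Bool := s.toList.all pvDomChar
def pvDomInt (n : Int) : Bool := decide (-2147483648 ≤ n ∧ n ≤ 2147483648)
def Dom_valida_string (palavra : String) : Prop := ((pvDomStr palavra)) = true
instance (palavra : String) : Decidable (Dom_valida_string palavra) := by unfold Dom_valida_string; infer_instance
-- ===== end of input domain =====

-- B replaces A's DFA loop with a flat predicate check (non-empty, last char '1', all chars binary); objective: simpler.
-- ===== PORT A =====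
def pvLoopA (st : String) : List Char → String
  | [] => st
  | c :: rest =>
    if st = "q0" then
      if c = '0' then pvLoopA "q0" rest
      else if c = '1' then pvLoopA "q1" rest
      else "rejeita"
    else if st = "q1" then
      if c = '0' then pvLoopA "q0" rest
      else if c = '1' then pvLoopA "q1" rest
      else "rejeita"
    else pvLoopA st rest

def valida_string (palavra : String) : String :=
  let estado := pvLoopA "q0" palavra.toList
  if estado = "q1" then "palavra valida(termina com 1)"
  else "palavra invalida(termina com 0)"

-- ===== PORT B =====
def valida_string_alt (palavra : String) : String :=
  let l := palavra.toList
  if l ≠ [] ∧ l.getLast? = some '1' ∧ l.all (fun c => c = '0' || c = '1')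
  then "palavra valida(termina com 1)"
  else "palavra invalida(termina com 0)"

-- ===== PRECONDITION & SPEC =====
def Spec_valida_string (palavra : String) (out : String) : Prop := out = valida_string_alt palavra
instance (palavra : String) (out : String) : Decidable (Spec_valida_string palavra out) := by unfold Spec_valida_string; infer_instance

-- ===== CLAIM (what is proved, stated in full; the proofs are below) =====
def Claim_equal_valida_string : Prop := ∀ (palavra : String), Dom_valida_string palavra → Spec_valida_string palavra (valida_string palavra)

-- ===== LEMMAS AND PROOFS =====
theorem pvLoopA_char (l : List Char) (s : String) (hs : s = "q0" ∨ s = "q1") :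
    pvLoopA s l =
      if l.all (fun c => c = '0' || c = '1')
      then (match l.getLast? with
            | none => s
            | some c => if c = '1' then "q1" else "q0")
      else "rejeita" := by
  induction l generalizing s with
  | nil => simp [pvLoopA]
  | cons c rest ih =>
    by_cases h0 : c = '0'
    · subst h0
      rcases hs with hs | hs <;> subst hs <;>
        simp [pvLoopA, ih _ (Or.inl rfl)] <;>
        cases hrest : rest.getLast? <;> simp [List.getLast?_cons, hrest]
    · by_cases h1 : c = '1'
      · subst h1
        rcases hs with hs | hs <;> subst hs <;>
          simp [pvLoopA, ih _ (Or.inr rfl)] <;>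
          cases hrest : rest.getLast? <;> simp [List.getLast?_cons, hrest]
      · rcases hs with hs | hs <;> subst hs <;>
          simp [pvLoopA, h0, h1]

-- ===== VERDICT (by name: the statement is the Claim_ definition above) =====
theorem valida_string_spec : Claim_equal_valida_string := by
  intro palavra _
  unfold Spec_valida_string valida_string valida_string_alt
  rw [pvLoopA_char _ _ (Or.inl rfl)]
  cases hl : palavra.toList with
  | nil => simp
  | cons c rest =>
    by_cases hall : (c :: rest).all (fun c => c = '0' || c = '1')
    · simp only [hall, if_true]
      cases hlast : (c :: rest).getLast? with
      | none => simp at hlast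
      | some d =>
        by_cases hd : d = '1' <;> simp [hd]
    · simp [hall]
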